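-- pv_equiv track=rewrite | github.com/swordlin/DTPM | util/data_helper.py | __split_dataset_by_category
-- ===== SOURCE A (Python) =====
-- def __split_dataset_by_category(bug_msg_all):
-- 	'''
-- 	按照类别划分，每个类别取80%做训练集，20%做测试集。
-- 	:param bug_msg_all:
-- 	:return:
-- 	'''
-- 	fixed_by_developers = {}
-- 	# for i in range(len(bug_msg_all)):  # 统计每个开发者修复的所有bug的id
-- 	for bugid, value in bug_msg_all.items():
-- 		devr = value[0]
-- 		if devr not in fixed_by_developers.keys():
-- 			fixed_by_developers[devr] = []
-- 		fixed_by_developers[devr].append(bugid)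
-- 	train_ids = []
-- 	eval_ids = []
-- 	for devr, value in fixed_by_developers.items():
-- 		# value = sorted(value)       # 将每类按照bugid排序，就算没有这句，value其实也是具有顺序的。dict虽然是无序的，但是它每次无序都一样
-- 		delta = int(len(value)*0.8)
-- 		train_ids += value[:delta]
-- 		eval_ids += value[delta:]
-- 	# 按bugid分别排序训练集和测试集，这样做有个好处，就是按照固定形式将类别数据打散
-- 	return [sorted(train_ids), sorted(eval_ids)]
-- ===== SOURCE B (Python) =====
-- def __split_dataset_by_category(bug_msg_all):
--     # Two streaming passes: count bugs per developer, then assign each bug by its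
--     # running index within its developer's group (index < 80% of the count -> train).
--     counts = {}
--     for bugid, value in bug_msg_all.items():
--         devr = value[0]
--         counts[devr] = counts.get(devr, 0) + 1
--     delta = {devr: int(c * 0.8) for devr, c in counts.items()}
--     seen = {}
--     train_ids = []
--     eval_ids = []
--     for bugid, value in bug_msg_all.items():
--         devr = value[0]
--         k = seen.get(devr, 0)
--         if k < delta[devr]:
--             train_ids.append(bugid)
--         else:
--             eval_ids.append(bugid)
--         seen[devr] = k + 1
--     return [sorted(train_ids), sorted(eval_ids)]
-- ===== Notes on version B (the rewrite author's own statement) =====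
-- stated objective: alternative
-- what changed: Instead of building a dict of per-developer bugid lists and slicing each group at 80%, B makes two streaming passes: one counting bugs per developer, one assigning each bug to train/eval by its running index within its developer's group; no grouped lists are ever materialised.
-- outside the precondition, e.g. on __split_dataset_by_category({'1': []}): A raises IndexError, B raises IndexError
import Mathlib
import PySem

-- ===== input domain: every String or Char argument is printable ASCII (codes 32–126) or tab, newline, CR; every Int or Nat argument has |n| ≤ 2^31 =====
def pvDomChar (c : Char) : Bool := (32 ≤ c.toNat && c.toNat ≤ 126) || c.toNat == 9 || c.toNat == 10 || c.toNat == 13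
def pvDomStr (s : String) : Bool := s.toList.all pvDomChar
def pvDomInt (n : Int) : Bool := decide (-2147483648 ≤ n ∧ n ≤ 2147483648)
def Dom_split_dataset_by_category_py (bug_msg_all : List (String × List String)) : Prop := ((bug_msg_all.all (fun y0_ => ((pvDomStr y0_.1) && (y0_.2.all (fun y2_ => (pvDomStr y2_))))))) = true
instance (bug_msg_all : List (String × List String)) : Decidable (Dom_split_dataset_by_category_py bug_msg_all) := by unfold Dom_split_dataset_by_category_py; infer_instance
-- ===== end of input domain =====

-- B replaces A's grouped per-developer lists + 80% slicing by two streaming passes (a per-developer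
-- counter, then a running-index assignment); same return value (alternative decomposition, no speed claim).


-- ===== PORT A =====
-- value[0]; IndexError (none) on an empty value list, which Pre_ excludes — the "" default is never reached there.
def pvDev (v : List String) : String := (PySem.List.pyGet? v 0).getD ""

-- int(len(value)*0.8) ported as (4*len)//5: exact for every length within the Dom bound 2^31 (checked numerically).
def pvDelta (n : Int) : Int := PySem.Int.floordiv (4 * n) 5

-- loop body of A's first loop: if devr not in keys: G[devr] = []; G[devr].append(bugid)
def pvAStep (d : PySem.Dict String (List String)) (p : String × List String) : PySem.Dict String (List String) :=
  let devr := pvDev p.2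
  let d := if d.contains devr then d else d.insert devr []
  d.modify devr [] (fun l => l ++ [p.1])

-- loop body of A's second loop: train_ids += value[:delta]; eval_ids += value[delta:]
def pvASplit (acc : List String × List String) (kv : String × List String) : List String × List String :=
  let delta := pvDelta ((kv.2.length : Int))
  (acc.1 ++ PySem.List.slice kv.2 none (some delta), acc.2 ++ PySem.List.slice kv.2 (some delta) none)

def split_dataset_by_category_py (bug_msg_all : List (String × List String)) : List (List String) :=
  let fixed := bug_msg_all.foldl pvAStep PySem.Dict.empty
  let te := fixed.items.foldl pvASplit ([], [])
  [PySem.List.sorted te.1 (fun x => x) false, PySem.List.sorted te.2 (fun x => x) false]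

-- ===== PORT B =====
-- pass 1 body: counts[devr] = counts.get(devr, 0) + 1
def pvBCount (d : PySem.Dict String Int) (p : String × List String) : PySem.Dict String Int :=
  d.insert (pvDev p.2) (d.getD (pvDev p.2) 0 + 1)

-- pass 2 body, parameterised by the delta dict; delta[devr] is always a present key (getD default unreachable)
def pvBStep (delta : PySem.Dict String Int)
    (st : PySem.Dict String Int × List String × List String) (p : String × List String) :
    PySem.Dict String Int × List String × List String :=
  let devr := pvDev p.2
  let k := st.1.getD devr 0
  if k < delta.getD devr 0 then (st.1.insert devr (k + 1), st.2.1 ++ [p.1], st.2.2)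
  else (st.1.insert devr (k + 1), st.2.1, st.2.2 ++ [p.1])

def split_dataset_by_category_py_alt (bug_msg_all : List (String × List String)) : List (List String) :=
  let counts := bug_msg_all.foldl pvBCount PySem.Dict.empty
  -- delta = {devr: int(c * 0.8) for devr, c in counts.items()}
  let delta := counts.items.foldl (fun d kv => d.insert kv.1 (pvDelta kv.2)) PySem.Dict.empty
  let st := bug_msg_all.foldl (pvBStep delta) (PySem.Dict.empty, [], [])
  [PySem.List.sorted st.2.1 (fun x => x) false, PySem.List.sorted st.2.2 (fun x => x) false]

-- ===== PRECONDITION & SPEC =====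
-- Pre_ excludes pairs whose value list is empty (value[0] raises IndexError in A) and association
-- lists with duplicate keys, which no Python dict can represent (the dict encoding collapses them).
def Pre_split_dataset_by_category_py (bug_msg_all : List (String × List String)) : Prop :=
  (bug_msg_all.all (fun p => !p.2.isEmpty)) = true ∧ (bug_msg_all.map Prod.fst).Nodup
instance (bug_msg_all : List (String × List String)) : Decidable (Pre_split_dataset_by_category_py bug_msg_all) := by unfold Pre_split_dataset_by_category_py; infer_instance
def pvWitness_split_dataset_by_category_py : (List (String × List String)) :=
  [("7", ["alice", "x"]), ("3", ["bob"]), ("5", ["alice"]), ("1", ["alice"]), ("2", ["alice"]), ("9", ["alice"]), ("8", ["bob"])]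

def Spec_split_dataset_by_category_py (bug_msg_all : List (String × List String)) (out : List (List String)) : Prop := out = split_dataset_by_category_py_alt bug_msg_all
instance (bug_msg_all : List (String × List String)) (out : List (List String)) : Decidable (Spec_split_dataset_by_category_py bug_msg_all out) := by unfold Spec_split_dataset_by_category_py; infer_instance

-- ===== CLAIM (what is proved, stated in full; the proofs are below) =====
def Claim_equal_split_dataset_by_category_py : Prop := ∀ (bug_msg_all : List (String × List String)), Dom_split_dataset_by_category_py bug_msg_all → Pre_split_dataset_by_category_py bug_msg_all → Spec_split_dataset_by_category_py bug_msg_all (split_dataset_by_category_py bug_msg_all)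

-- ===== LEMMAS AND PROOFS =====

-- the per-developer group of bug ids, in stream order
def pvGrp (c : String) (L : List (String × List String)) : List String :=
  (L.filter (fun p => pvDev p.2 == c)).map Prod.fst

lemma pvDelta_nonneg (n : Int) (h : 0 ≤ n) : 0 ≤ pvDelta n := by
  unfold pvDelta PySem.Int.floordiv
  exact Int.fdiv_nonneg (by omega) (by norm_num)

lemma pvGrp_nil_of_not_mem (L : List (String × List String)) (c : String)
    (h : c ∉ L.map (fun p => pvDev p.2)) : pvGrp c L = [] := by
  unfold pvGrp
  rw [List.filter_eq_nil_iff.mpr, List.map_nil]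
  intro p hp hbeq
  exact h (List.mem_map.mpr ⟨p, hp, by simpa using hbeq⟩)

lemma pvGrp_length (L : List (String × List String)) (c : String) :
    (pvGrp c L).length = (L.map (fun p => pvDev p.2)).count c := by
  unfold pvGrp
  rw [List.length_map, List.count_eq_countP, List.countP_map, ← List.countP_eq_length_filter]
  rfl

lemma pvSum_update (devs : List String) (f f' : String → Multiset String) (d : String)
    (hnd : devs.Nodup) (hmem : d ∈ devs) (m : Multiset String)
    (hd : f' d = f d + m) (ho : ∀ c, c ≠ d → f' c = f c) :
    (devs.map f').sum = (devs.map f).sum + m := by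
  induction devs with
  | nil => simp at hmem
  | cons c cs ih =>
    rcases List.mem_cons.mp hmem with rfl | hm
    · have hrest : cs.map f' = cs.map f :=
        List.map_congr_left (fun x hx => ho x (fun hxd => (List.nodup_cons.mp hnd).1 (hxd ▸ hx)))
      simp only [List.map_cons, List.sum_cons, hrest, hd]
      exact add_right_comm _ m _
    · have hcd : c ≠ d := fun h => (List.nodup_cons.mp hnd).1 (h ▸ hm)
      simp only [List.map_cons, List.sum_cons, ho c hcd, ih (List.nodup_cons.mp hnd).2 hm]
      exact (add_assoc _ _ _).symm

lemma pvGrp_append_self (L : List (String × List String)) (p : String × List String) :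
    pvGrp (pvDev p.2) (L ++ [p]) = pvGrp (pvDev p.2) L ++ [p.1] := by
  simp [pvGrp, List.filter_append]

lemma pvGrp_append_ne (L : List (String × List String)) (p : String × List String) (c : String)
    (h : c ≠ pvDev p.2) : pvGrp c (L ++ [p]) = pvGrp c L := by
  simp [pvGrp, List.filter_append, Ne.symm h]

lemma pvTake_app_lt (g : List String) (x : String) (n : Nat) (h : g.length < n) :
    (g ++ [x]).take n = g.take n ++ [x] := by
  rw [List.take_append, List.take_of_length_le (le_of_lt h),
      List.take_of_length_le (by simp; omega)]

lemma pvDrop_app_lt (g : List String) (x : String) (n : Nat) (h : g.length < n) :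
    (g ++ [x]).drop n = g.drop n := by
  have h1 : (g ++ [x]).drop n = [] := List.drop_eq_nil_of_le (by simp; omega)
  have h2 : g.drop n = [] := List.drop_eq_nil_of_le (le_of_lt h)
  rw [h1, h2]

lemma pvTake_app_ge (g : List String) (x : String) (n : Nat) (h : n ≤ g.length) :
    (g ++ [x]).take n = g.take n := by
  rw [List.take_append, Nat.sub_eq_zero_of_le h, List.take_zero, List.append_nil]

lemma pvDrop_app_ge (g : List String) (x : String) (n : Nat) (h : n ≤ g.length) :
    (g ++ [x]).drop n = g.drop n ++ [x] := by
  rw [List.drop_append, Nat.sub_eq_zero_of_le h, List.drop_zero]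

lemma pvCoe_flatMap (devs : List String) (f : String → List String) :
    ((devs.flatMap f : List String) : Multiset String) = (devs.map (fun c => ((f c : List String) : Multiset String))).sum := by
  induction devs with
  | nil => simp
  | cons c cs ih => simp [List.flatMap_cons, ← Multiset.coe_add, ih]

lemma pvAStep_eq (d : PySem.Dict String (List String)) (p : String × List String) :
    pvAStep d p = d.modify (pvDev p.2) [] (fun l => l ++ [p.1]) := by
  unfold pvAStep
  by_cases h : d.contains (pvDev p.2)
  · simp [h]
  · have h' : d.getD (pvDev p.2) [] = [] := PySem.Dict.getD_of_not_contains d [] (by simpa using h)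
    simp [h, PySem.Dict.modify, PySem.Dict.getD_insert_self, PySem.Dict.insert_insert_self, h']

lemma pvA_fixed_eq (L : List (String × List String)) :
    L.foldl pvAStep PySem.Dict.empty
      = (L.map (fun p => (pvDev p.2, p.1))).foldl (fun d q => d.modify q.1 [] (fun l => l ++ [q.2])) PySem.Dict.empty := by
  rw [List.foldl_map]
  exact PySem.List.foldl_congr_mem _ _ _ _ (fun acc x _ => pvAStep_eq acc x)

lemma pvA_fixed_getD (L : List (String × List String)) (c : String) :
    (L.foldl pvAStep PySem.Dict.empty).getD c [] = pvGrp c L := by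
  rw [pvA_fixed_eq, PySem.Dict.getD_foldl_modify_append]
  simp [pvGrp, PySem.Dict.getD_empty, List.filter_map, Function.comp_def]

lemma pvA_fixed_keys (L : List (String × List String)) :
    (L.foldl pvAStep PySem.Dict.empty).keys = PySem.Set.ofList (L.map (fun p => pvDev p.2)) := by
  rw [PySem.List.foldl_congr_mem _ _ _ _ (fun acc (x : String × List String) (_ : x ∈ L) => pvAStep_eq acc x), PySem.Dict.keys_foldl_modify_key, PySem.Dict.keys_empty, PySem.Set.update_nil_left]

lemma pvA_fixed_nodup (L : List (String × List String)) :
    (L.foldl pvAStep PySem.Dict.empty).keys.Nodup := by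
  rw [pvA_fixed_keys]; exact PySem.Set.nodup_ofList _

lemma pvA_fixed_items (L : List (String × List String)) :
    (L.foldl pvAStep PySem.Dict.empty).items
      = (PySem.Set.ofList (L.map (fun p => pvDev p.2))).map (fun c => (c, pvGrp c L)) := by
  rw [PySem.Dict.items_eq_map_keys _ (pvA_fixed_nodup L) [], pvA_fixed_keys]
  exact List.map_congr_left (fun c _ => by rw [pvA_fixed_getD])

lemma pvASplit_fold (items : List (String × List String)) :
    items.foldl pvASplit ([], []) =
      (items.flatMap (fun kv => kv.2.take (pvDelta (kv.2.length : Int)).toNat),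
       items.flatMap (fun kv => kv.2.drop (pvDelta (kv.2.length : Int)).toNat)) := by
  unfold pvASplit
  rw [PySem.List.foldl_prod_mk
       (f := fun a (kv : String × List String) => a ++ PySem.List.slice kv.2 none (some (pvDelta (kv.2.length : Int))))
       (g := fun a (kv : String × List String) => a ++ PySem.List.slice kv.2 (some (pvDelta (kv.2.length : Int))) none)]
  rw [PySem.List.foldl_append_eq_flatMap, PySem.List.foldl_append_eq_flatMap]
  simp only [List.nil_append, Prod.mk.injEq]
  constructor <;> apply List.flatMap_congr <;> intro kv _
  · exact PySem.List.slice_to _ (pvDelta_nonneg _ (by positivity))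
  · exact PySem.List.slice_from _ (pvDelta_nonneg _ (by positivity))

lemma pvB_counts_eq (L : List (String × List String)) :
    L.foldl pvBCount PySem.Dict.empty = PySem.Dict.counter (L.map (fun p => pvDev p.2)) := by
  rw [← PySem.Dict.foldl_insert_getD_add_one_eq_counter, List.foldl_map]
  rfl

lemma pvB_delta_getD (L : List (String × List String)) (c : String)
    (hc : c ∈ L.map (fun p => pvDev p.2)) :
    ((L.foldl pvBCount PySem.Dict.empty).items.foldl
        (fun d kv => d.insert kv.1 (pvDelta kv.2)) PySem.Dict.empty).getD c 0
      = pvDelta (((L.map (fun p => pvDev p.2)).count c : Int)) := by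
  rw [pvB_counts_eq, PySem.Dict.items_counter]
  set devs := L.map (fun p => pvDev p.2) with hdevs
  set l := (PySem.Set.ofList devs).map (fun k => (k, (devs.count k : Int))) with hl
  have hnodfst : (l.map Prod.fst).Nodup := by
    rw [hl, List.map_map]
    have : (Prod.fst ∘ fun k : String => (k, (devs.count k : Int))) = id := by funext k; rfl
    rw [this, List.map_id]
    exact PySem.Set.nodup_ofList devs
  have hitems : (l.foldl (fun d kv => d.insert kv.1 (pvDelta kv.2)) PySem.Dict.empty).items
      = l.map (fun a => (a.1, pvDelta a.2)) := by
    have := PySem.Dict.items_foldl_insert_fresh (l := l) (k := Prod.fst) (v := fun kv => pvDelta kv.2)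
      (d := PySem.Dict.empty) (by intro a _; exact PySem.Dict.contains_empty _) hnodfst
    simpa using this
  have hmem : (c, pvDelta ((devs.count c : Int))) ∈ l.map (fun a => (a.1, pvDelta a.2)) := by
    rw [hl]
    refine List.mem_map.mpr ⟨(c, (devs.count c : Int)), ?_, rfl⟩
    exact List.mem_map.mpr ⟨c, (PySem.Set.mem_ofList _ _).mpr hc, rfl⟩
  have hnd : (l.foldl (fun d kv => d.insert kv.1 (pvDelta kv.2)) PySem.Dict.empty).keys.Nodup := by
    simp only [PySem.Dict.keys, hitems, List.map_map]
    simpa [Function.comp_def] using hnodfst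
  exact PySem.Dict.getD_of_mem_items _ (hitems ▸ hmem) hnd 0

lemma pvB_inv (D : PySem.Dict String Int) (L : List (String × List String)) :
    (∀ c, (L.foldl (pvBStep D) (PySem.Dict.empty, [], [])).1.getD c 0 = ((L.map (fun p => pvDev p.2)).count c : Int))
  ∧ ((L.foldl (pvBStep D) (PySem.Dict.empty, [], [])).2.1 : Multiset String)
      = ((PySem.Set.ofList (L.map (fun p => pvDev p.2))).map
          (fun c => (((pvGrp c L).take (D.getD c 0).toNat : List String) : Multiset String))).sum
  ∧ ((L.foldl (pvBStep D) (PySem.Dict.empty, [], [])).2.2 : Multiset String)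
      = ((PySem.Set.ofList (L.map (fun p => pvDev p.2))).map
          (fun c => (((pvGrp c L).drop (D.getD c 0).toNat : List String) : Multiset String))).sum := by
  induction L using List.reverseRecOn with
  | nil =>
    exact ⟨fun c => by simp [PySem.Dict.getD_empty], by simp, by simp⟩
  | append_singleton L p ih =>
    obtain ⟨ih1, ih2, ih3⟩ := ih
    set st := L.foldl (pvBStep D) (PySem.Dict.empty, [], []) with hst
    have hfold : (L ++ [p]).foldl (pvBStep D) (PySem.Dict.empty, [], []) = pvBStep D st p := by
      rw [List.foldl_append]; rfl
    have hdevs' : (L ++ [p]).map (fun p => pvDev p.2) = L.map (fun p => pvDev p.2) ++ [pvDev p.2] := by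
      rw [List.map_append]
      simp only [List.map_cons, List.map_nil]
    have hset' : PySem.Set.ofList (L.map (fun p => pvDev p.2) ++ [pvDev p.2])
        = PySem.Set.add (PySem.Set.ofList (L.map (fun p => pvDev p.2))) (pvDev p.2) :=
      PySem.Set.ofList_append_singleton _ _
    have hk : st.1.getD (pvDev p.2) 0 = ((L.map (fun p => pvDev p.2)).count (pvDev p.2) : Int) := ih1 _
    have hlen : (pvGrp (pvDev p.2) L).length = (L.map (fun p => pvDev p.2)).count (pvDev p.2) :=
      pvGrp_length L _
    have hseen : ∀ v : Int, ∀ c, (st.1.insert (pvDev p.2) v).getD c 0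
        = if c = pvDev p.2 then v else ((L.map (fun p => pvDev p.2)).count c : Int) := by
      intro v c
      rw [PySem.Dict.getD_insert]
      by_cases hcd : c = pvDev p.2
      · rw [if_pos hcd, if_pos hcd]
      · rw [if_neg hcd, if_neg hcd, ih1 c]
    have hcount : ∀ c, (((L.map (fun p => pvDev p.2)) ++ [pvDev p.2]).count c : Int)
        = if c = pvDev p.2 then ((L.map (fun p => pvDev p.2)).count c : Int) + 1
          else ((L.map (fun p => pvDev p.2)).count c : Int) := by
      intro c
      by_cases hcd : c = pvDev p.2
      · subst hcd; rw [if_pos rfl]; simp [List.count_append]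
      · rw [if_neg hcd]
        have h0 : List.count c [pvDev p.2] = 0 := List.count_eq_zero.mpr (by simp [hcd])
        simp [List.count_append, h0]
    by_cases hcond : st.1.getD (pvDev p.2) 0 < D.getD (pvDev p.2) 0
    · -- train branch
      have hstep : pvBStep D st p
          = (st.1.insert (pvDev p.2) (st.1.getD (pvDev p.2) 0 + 1), st.2.1 ++ [p.1], st.2.2) := by
        unfold pvBStep; rw [if_pos hcond]
      rw [hfold, hstep, hdevs']
      have hlt : (pvGrp (pvDev p.2) L).length < (D.getD (pvDev p.2) 0).toNat := by rw [hlen]; omega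
      refine ⟨?_, ?_, ?_⟩
      · intro c
        rw [hseen, hcount]
        by_cases hcd : c = pvDev p.2
        · rw [if_pos hcd, if_pos hcd, hcd, hk]
        · rw [if_neg hcd, if_neg hcd]
      · by_cases hd : pvDev p.2 ∈ L.map (fun p => pvDev p.2)
        · rw [hset', PySem.Set.add_of_mem ((PySem.Set.mem_ofList _ _).mpr hd)]
          have hupd := pvSum_update (PySem.Set.ofList (L.map (fun p => pvDev p.2)))
            (fun c => (((pvGrp c L).take (D.getD c 0).toNat : List String) : Multiset String))
            (fun c => (((pvGrp c (L ++ [p])).take (D.getD c 0).toNat : List String) : Multiset String))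
            (pvDev p.2) (PySem.Set.nodup_ofList _) ((PySem.Set.mem_ofList _ _).mpr hd) {p.1}
            (by simp only [pvGrp_append_self, pvTake_app_lt _ _ _ hlt, ← Multiset.coe_add, Multiset.coe_singleton])
            (fun c hcd => by simp only [pvGrp_append_ne _ _ _ hcd])
          rw [hupd, ← ih2]
          simp [← Multiset.coe_add]
        · have hgrp : pvGrp (pvDev p.2) L = [] := pvGrp_nil_of_not_mem L _ hd
          rw [hset', PySem.Set.add_of_not_mem (fun hmem => hd ((PySem.Set.mem_ofList _ _).mp hmem)),
              List.map_append, List.sum_append]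
          have hothers := List.map_congr_left
            (f := fun c => (((pvGrp c (L ++ [p])).take (D.getD c 0).toNat : List String) : Multiset String))
            (g := fun c => (((pvGrp c L).take (D.getD c 0).toNat : List String) : Multiset String))
            (l := PySem.Set.ofList (L.map (fun p => pvDev p.2)))
            (fun c hc => by simp only [pvGrp_append_ne _ _ _
              (fun h => hd (h ▸ (PySem.Set.mem_ofList _ _).mp hc))])
          rw [hothers, ← ih2]
          simp only [List.map_cons, List.map_nil, List.sum_cons, List.sum_nil,
            pvGrp_append_self, hgrp, List.nil_append]
          have h1 : 1 ≤ (D.getD (pvDev p.2) 0).toNat := by rw [hgrp] at hlt; simp only [List.length_nil] at hlt; omega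
          rw [List.take_of_length_le (by simpa using h1)]
          simp [← Multiset.coe_add]
      · by_cases hd : pvDev p.2 ∈ L.map (fun p => pvDev p.2)
        · rw [hset', PySem.Set.add_of_mem ((PySem.Set.mem_ofList _ _).mpr hd)]
          have hmaps := List.map_congr_left
            (f := fun c => (((pvGrp c (L ++ [p])).drop (D.getD c 0).toNat : List String) : Multiset String))
            (g := fun c => (((pvGrp c L).drop (D.getD c 0).toNat : List String) : Multiset String))
            (l := PySem.Set.ofList (L.map (fun p => pvDev p.2)))
            (fun c hc => by
            by_cases hcd : c = pvDev p.2
            · subst hcd; simp only [pvGrp_append_self, pvDrop_app_lt _ _ _ hlt]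
            · simp only [pvGrp_append_ne _ _ _ hcd])
          rw [hmaps, ← ih3]
        · have hgrp : pvGrp (pvDev p.2) L = [] := pvGrp_nil_of_not_mem L _ hd
          rw [hset', PySem.Set.add_of_not_mem (fun hmem => hd ((PySem.Set.mem_ofList _ _).mp hmem)),
              List.map_append, List.sum_append]
          have hothers := List.map_congr_left
            (f := fun c => (((pvGrp c (L ++ [p])).drop (D.getD c 0).toNat : List String) : Multiset String))
            (g := fun c => (((pvGrp c L).drop (D.getD c 0).toNat : List String) : Multiset String))
            (l := PySem.Set.ofList (L.map (fun p => pvDev p.2)))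
            (fun c hc => by simp only [pvGrp_append_ne _ _ _
              (fun h => hd (h ▸ (PySem.Set.mem_ofList _ _).mp hc))])
          rw [hothers, ← ih3]
          simp only [List.map_cons, List.map_nil, List.sum_cons, List.sum_nil,
            pvGrp_append_self, hgrp, List.nil_append]
          have h1 : 1 ≤ (D.getD (pvDev p.2) 0).toNat := by rw [hgrp] at hlt; simp only [List.length_nil] at hlt; omega
          rw [List.drop_eq_nil_of_le (by simpa using h1)]
          simp
    · -- eval branch
      have hstep : pvBStep D st p
          = (st.1.insert (pvDev p.2) (st.1.getD (pvDev p.2) 0 + 1), st.2.1, st.2.2 ++ [p.1]) := by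
        unfold pvBStep; rw [if_neg hcond]
      rw [hfold, hstep, hdevs']
      have hge : (D.getD (pvDev p.2) 0).toNat ≤ (pvGrp (pvDev p.2) L).length := by rw [hlen]; omega
      refine ⟨?_, ?_, ?_⟩
      · intro c
        rw [hseen, hcount]
        by_cases hcd : c = pvDev p.2
        · rw [if_pos hcd, if_pos hcd, hcd, hk]
        · rw [if_neg hcd, if_neg hcd]
      · by_cases hd : pvDev p.2 ∈ L.map (fun p => pvDev p.2)
        · rw [hset', PySem.Set.add_of_mem ((PySem.Set.mem_ofList _ _).mpr hd)]
          have hmaps := List.map_congr_left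
            (f := fun c => (((pvGrp c (L ++ [p])).take (D.getD c 0).toNat : List String) : Multiset String))
            (g := fun c => (((pvGrp c L).take (D.getD c 0).toNat : List String) : Multiset String))
            (l := PySem.Set.ofList (L.map (fun p => pvDev p.2)))
            (fun c hc => by
            by_cases hcd : c = pvDev p.2
            · subst hcd; simp only [pvGrp_append_self, pvTake_app_ge _ _ _ hge]
            · simp only [pvGrp_append_ne _ _ _ hcd])
          rw [hmaps, ← ih2]
        · have hgrp : pvGrp (pvDev p.2) L = [] := pvGrp_nil_of_not_mem L _ hd
          rw [hset', PySem.Set.add_of_not_mem (fun hmem => hd ((PySem.Set.mem_ofList _ _).mp hmem)),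
              List.map_append, List.sum_append]
          have hothers := List.map_congr_left
            (f := fun c => (((pvGrp c (L ++ [p])).take (D.getD c 0).toNat : List String) : Multiset String))
            (g := fun c => (((pvGrp c L).take (D.getD c 0).toNat : List String) : Multiset String))
            (l := PySem.Set.ofList (L.map (fun p => pvDev p.2)))
            (fun c hc => by simp only [pvGrp_append_ne _ _ _
              (fun h => hd (h ▸ (PySem.Set.mem_ofList _ _).mp hc))])
          rw [hothers, ← ih2]
          simp only [List.map_cons, List.map_nil, List.sum_cons, List.sum_nil,
            pvGrp_append_self, hgrp, List.nil_append]
          have h0 : (D.getD (pvDev p.2) 0).toNat = 0 := by rw [hgrp] at hge; simp only [List.length_nil] at hge; omega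
          rw [h0, List.take_zero]
          simp
      · by_cases hd : pvDev p.2 ∈ L.map (fun p => pvDev p.2)
        · rw [hset', PySem.Set.add_of_mem ((PySem.Set.mem_ofList _ _).mpr hd)]
          have hupd := pvSum_update (PySem.Set.ofList (L.map (fun p => pvDev p.2)))
            (fun c => (((pvGrp c L).drop (D.getD c 0).toNat : List String) : Multiset String))
            (fun c => (((pvGrp c (L ++ [p])).drop (D.getD c 0).toNat : List String) : Multiset String))
            (pvDev p.2) (PySem.Set.nodup_ofList _) ((PySem.Set.mem_ofList _ _).mpr hd) {p.1}
            (by simp only [pvGrp_append_self, pvDrop_app_ge _ _ _ hge, ← Multiset.coe_add, Multiset.coe_singleton])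
            (fun c hcd => by simp only [pvGrp_append_ne _ _ _ hcd])
          rw [hupd, ← ih3]
          simp [← Multiset.coe_add]
        · have hgrp : pvGrp (pvDev p.2) L = [] := pvGrp_nil_of_not_mem L _ hd
          rw [hset', PySem.Set.add_of_not_mem (fun hmem => hd ((PySem.Set.mem_ofList _ _).mp hmem)),
              List.map_append, List.sum_append]
          have hothers := List.map_congr_left
            (f := fun c => (((pvGrp c (L ++ [p])).drop (D.getD c 0).toNat : List String) : Multiset String))
            (g := fun c => (((pvGrp c L).drop (D.getD c 0).toNat : List String) : Multiset String))
            (l := PySem.Set.ofList (L.map (fun p => pvDev p.2)))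
            (fun c hc => by simp only [pvGrp_append_ne _ _ _
              (fun h => hd (h ▸ (PySem.Set.mem_ofList _ _).mp hc))])
          rw [hothers, ← ih3]
          simp only [List.map_cons, List.map_nil, List.sum_cons, List.sum_nil,
            pvGrp_append_self, hgrp, List.nil_append]
          have h0 : (D.getD (pvDev p.2) 0).toNat = 0 := by rw [hgrp] at hge; simp only [List.length_nil] at hge; omega
          rw [h0, List.drop_zero]
          simp [← Multiset.coe_add]

-- ===== VERDICT (by name: the statement is the Claim_ definition above) =====
-- The multiset of A's train (resp. eval) list and of B's train (resp. eval) list both equal the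
-- sum, over the distinct developers, of the first-80% (resp. last-20%) of that developer's group.
theorem split_dataset_by_category_py_spec : Claim_equal_split_dataset_by_category_py := by
  unfold Claim_equal_split_dataset_by_category_py
  intro L _ _
  unfold Spec_split_dataset_by_category_py
  show split_dataset_by_category_py L = split_dataset_by_category_py_alt L
  -- A's output as flatMaps over the developer set
  have hA : split_dataset_by_category_py L =
      [PySem.List.sorted ((PySem.Set.ofList (L.map (fun p => pvDev p.2))).flatMap
          (fun c => (pvGrp c L).take (pvDelta ((pvGrp c L).length : Int)).toNat)) (fun x => x) false,
       PySem.List.sorted ((PySem.Set.ofList (L.map (fun p => pvDev p.2))).flatMap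
          (fun c => (pvGrp c L).drop (pvDelta ((pvGrp c L).length : Int)).toNat)) (fun x => x) false] := by
    show [PySem.List.sorted ((L.foldl pvAStep PySem.Dict.empty).items.foldl pvASplit ([], [])).1 (fun x => x) false,
          PySem.List.sorted ((L.foldl pvAStep PySem.Dict.empty).items.foldl pvASplit ([], [])).2 (fun x => x) false]
        = _
    rw [pvA_fixed_items, pvASplit_fold, List.flatMap_map, List.flatMap_map]
  -- B's output via the loop invariant
  set D := ((L.foldl pvBCount PySem.Dict.empty).items.foldl
      (fun d kv => d.insert kv.1 (pvDelta kv.2)) PySem.Dict.empty) with hD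
  obtain ⟨_, hB2, hB3⟩ := pvB_inv D L
  have hB : split_dataset_by_category_py_alt L =
      [PySem.List.sorted (L.foldl (pvBStep D) (PySem.Dict.empty, [], [])).2.1 (fun x => x) false,
       PySem.List.sorted (L.foldl (pvBStep D) (PySem.Dict.empty, [], [])).2.2 (fun x => x) false] := rfl
  -- the two summand functions agree on every developer of the set
  have hcongr : ∀ part : (List String → Nat → List String),
      (PySem.Set.ofList (L.map (fun p => pvDev p.2))).map
          (fun c => (((part (pvGrp c L) (D.getD c 0).toNat) : List String) : Multiset String))
    = (PySem.Set.ofList (L.map (fun p => pvDev p.2))).map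
          (fun c => (((part (pvGrp c L) (pvDelta ((pvGrp c L).length : Int)).toNat) : List String) : Multiset String)) := by
    intro part
    refine List.map_congr_left (fun c hc => ?_)
    have hcm : c ∈ L.map (fun p => pvDev p.2) := (PySem.Set.mem_ofList _ _).mp hc
    have := pvB_delta_getD L c hcm
    rw [← hD] at this
    simp only [this, pvGrp_length]
  -- train lists are permutations
  have hperm1 : ((PySem.Set.ofList (L.map (fun p => pvDev p.2))).flatMap
        (fun c => (pvGrp c L).take (pvDelta ((pvGrp c L).length : Int)).toNat)).Perm
      (L.foldl (pvBStep D) (PySem.Dict.empty, [], [])).2.1 := by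
    rw [← Multiset.coe_eq_coe, pvCoe_flatMap, hB2, hcongr (fun g n => g.take n)]
  have hperm2 : ((PySem.Set.ofList (L.map (fun p => pvDev p.2))).flatMap
        (fun c => (pvGrp c L).drop (pvDelta ((pvGrp c L).length : Int)).toNat)).Perm
      (L.foldl (pvBStep D) (PySem.Dict.empty, [], [])).2.2 := by
    rw [← Multiset.coe_eq_coe, pvCoe_flatMap, hB3, hcongr (fun g n => g.drop n)]
  rw [hA, hB, (PySem.List.sorted_id_eq_sorted_id_iff_perm _ _).mpr hperm1,
      (PySem.List.sorted_id_eq_sorted_id_iff_perm _ _).mpr hperm2]
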